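-- pv_equiv track=rewrite | github.com/bilkent-cs-533/project | main.py | get_inverse_doc_freq
-- ===== SOURCE A (Python) =====
-- def get_inverse_doc_freq(docs, corpus):
--     """
--     returns a dictionary of word to count of document which contains the word
--     """
--     d = dict()
--     for word in corpus:
--         i = 0
--         for doc in docs:
--             if word in doc:
--                 i += 1
--         d[word] = i
--
--     return d
-- ===== SOURCE B (Python) =====
-- def get_inverse_doc_freq(docs, corpus):
--     """
--     returns a dictionary of word to count of document which contains the word
--     """
--     counts = {}
--     for doc in docs:
--         for word in dict.fromkeys(doc):
--             counts[word] = counts.get(word, 0) + 1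
--     return {word: counts.get(word, 0) for word in corpus}
-- ===== Notes on version B (the rewrite author's own statement) =====
-- stated objective: faster
-- what changed: B builds a word->doc-count dictionary in one pass over the documents (counting each distinct word of a document once) and then answers each corpus word with an O(1) lookup, instead of A's scan of every document for every corpus word.
import Mathlib
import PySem

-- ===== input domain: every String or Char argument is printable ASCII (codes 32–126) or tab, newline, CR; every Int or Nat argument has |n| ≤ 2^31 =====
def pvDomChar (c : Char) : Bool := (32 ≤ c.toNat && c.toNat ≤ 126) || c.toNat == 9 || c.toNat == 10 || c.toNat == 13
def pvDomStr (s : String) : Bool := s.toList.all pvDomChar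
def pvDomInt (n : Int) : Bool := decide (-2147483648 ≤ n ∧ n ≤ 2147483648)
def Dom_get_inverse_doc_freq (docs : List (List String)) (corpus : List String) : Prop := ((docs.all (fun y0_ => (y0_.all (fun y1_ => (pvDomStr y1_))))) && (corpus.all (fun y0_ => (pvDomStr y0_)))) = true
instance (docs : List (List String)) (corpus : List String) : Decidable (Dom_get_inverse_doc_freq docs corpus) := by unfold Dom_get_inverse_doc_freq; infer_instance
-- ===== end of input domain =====

-- B replaces A's per-corpus-word scan of all documents by a single counting pass over
-- the documents followed by O(1) lookups (asymptotically faster; same return value).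


-- ===== PORT A =====
def get_inverse_doc_freq (docs : List (List String)) (corpus : List String) : List (String × Int) :=
  (corpus.foldl (fun d word =>
      d.insert word (docs.foldl (fun i doc => if word ∈ doc then i + 1 else i) (0 : Int)))
    PySem.Dict.empty).items

-- ===== PORT B =====
def get_inverse_doc_freq_alt (docs : List (List String)) (corpus : List String) : List (String × Int) :=
  let counts : PySem.Dict String Int :=
    docs.foldl (fun d doc =>
      (PySem.List.dedup doc).foldl (fun d word => d.modify word 0 (· + 1)) d)
      PySem.Dict.empty
  (corpus.foldl (fun out word => out.insert word (counts.getD word 0)) PySem.Dict.empty).items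

-- ===== PRECONDITION & SPEC =====
def Spec_get_inverse_doc_freq (docs : List (List String)) (corpus : List String) (out : List (String × Int)) : Prop := out = get_inverse_doc_freq_alt docs corpus
instance (docs : List (List String)) (corpus : List String) (out : List (String × Int)) : Decidable (Spec_get_inverse_doc_freq docs corpus out) := by unfold Spec_get_inverse_doc_freq; infer_instance

-- ===== CLAIM (what is proved, stated in full; the proofs are below) =====
def Claim_equal_get_inverse_doc_freq : Prop := ∀ (docs : List (List String)) (corpus : List String), Dom_get_inverse_doc_freq docs corpus → Spec_get_inverse_doc_freq docs corpus (get_inverse_doc_freq docs corpus)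

-- ===== LEMMAS AND PROOFS =====

-- B's counter gives, for any word, the number of documents containing it.
theorem counts_getD (docs : List (List String)) (d : PySem.Dict String Int) (w : String) :
    (docs.foldl (fun d doc =>
        (PySem.List.dedup doc).foldl (fun d word => d.modify word 0 (· + 1)) d) d).getD w 0
      = d.getD w 0 + (docs.countP (fun doc => decide (w ∈ doc)) : Int) := by
  induction docs generalizing d with
  | nil => simp
  | cons doc rest ih =>
      rw [List.foldl_cons, ih, PySem.Dict.getD_foldl_modify_add_one]
      have h : ((PySem.List.dedup doc).count w : Int) = if w ∈ doc then 1 else 0 := by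
        simp only [PySem.List.dedup_eq_ofList]
        by_cases hm : w ∈ doc
        · have h1 : (PySem.Set.ofList doc).count w = 1 :=
            List.count_eq_one_of_mem (PySem.Set.nodup_ofList doc)
              (by simpa [PySem.Set.mem_ofList] using hm)
          rw [h1]; simp [hm]
        · have h0 : (PySem.Set.ofList doc).count w = 0 :=
            List.count_eq_zero.mpr (by simpa [PySem.Set.mem_ofList] using hm)
          rw [h0]; simp [hm]
      rw [h, List.countP_cons]
      by_cases hm : w ∈ doc <;> simp [hm] <;> ring

-- A's inner loop counts the documents containing the word.
theorem inner_count (docs : List (List String)) (w : String) :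
    docs.foldl (fun i doc => if w ∈ doc then i + 1 else i) (0 : Int)
      = (docs.countP (fun doc => decide (w ∈ doc)) : Int) := by
  have : ∀ (i : Int), docs.foldl (fun i doc => if w ∈ doc then i + 1 else i) i
      = i + (docs.countP (fun doc => decide (w ∈ doc)) : Int) := by
    induction docs with
    | nil => simp
    | cons doc rest ih =>
        intro i
        rw [List.foldl_cons, List.countP_cons]
        by_cases hm : w ∈ doc <;> simp [hm, ih] <;> ring
  simpa using this 0

-- ===== VERDICT (by name: the statement is the Claim_ definition above) =====
theorem get_inverse_doc_freq_spec : Claim_equal_get_inverse_doc_freq := by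
  intro docs corpus _
  unfold Spec_get_inverse_doc_freq get_inverse_doc_freq get_inverse_doc_freq_alt
  congr 1
  apply PySem.List.foldl_congr_mem
  intro d word _
  rw [inner_count, counts_getD]
  simp
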